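-- pv_equiv track=rewrite | github.com/chajk811/algorithm | 프로그래머스/해시_베스트앨범.py | hash_func
-- ===== SOURCE A (Python) =====
-- def hash_func(genres, plays):
--     table = {}
--     rank = {}
--
--     for i in range(len(genres)):
--         if not table.get(genres[i]):
--             table[genres[i]] = {plays[i]: [i]}
--             rank[genres[i]] = plays[i]
--         else:
--             rank[genres[i]] += plays[i]
--             if table[genres[i]].get(plays[i]):
--                 table[genres[i]][plays[i]].append(i)
--             else:
--                 table[genres[i]][plays[i]] = [i]
--     return table, rank
-- ===== SOURCE B (Python) =====
-- def hash_func(genres, plays):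
--     # Pass 1: group indices by genre then by play count (first-appearance key order,
--     # exactly the table A builds).  Pass 2: derive rank from the finished table
--     # instead of accumulating it during the scan.
--     table = {}
--     for i, g in enumerate(genres):
--         table.setdefault(g, {}).setdefault(plays[i], []).append(i)
--     rank = {g: sum(p * len(ix) for p, ix in inner.items()) for g, inner in table.items()}
--     return table, rank
-- ===== Notes on version B (the rewrite author's own statement) =====
-- stated objective: alternative
-- what changed: A accumulates rank incrementally inside the single index scan; B first builds only the grouping table with setdefault, then derives rank in a second pass as sum(play*len(indices)) over the finished table.
import Mathlib
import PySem

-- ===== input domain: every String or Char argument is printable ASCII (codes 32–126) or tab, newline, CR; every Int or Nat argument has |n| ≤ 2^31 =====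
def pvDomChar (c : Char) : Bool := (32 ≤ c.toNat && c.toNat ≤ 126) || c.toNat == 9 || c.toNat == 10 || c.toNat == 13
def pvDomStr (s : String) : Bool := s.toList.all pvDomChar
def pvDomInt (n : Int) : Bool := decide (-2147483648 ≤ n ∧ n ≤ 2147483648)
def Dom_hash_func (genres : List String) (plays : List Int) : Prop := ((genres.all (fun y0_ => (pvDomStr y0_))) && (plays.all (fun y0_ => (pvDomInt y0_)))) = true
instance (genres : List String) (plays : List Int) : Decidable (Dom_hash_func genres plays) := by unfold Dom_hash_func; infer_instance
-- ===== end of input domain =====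

-- B replaces A's single scan that accumulates rank alongside the table by a grouping pass
-- plus a second pass that derives rank from the finished table (objective: alternative decomposition).

-- ===== PORT A =====
-- A's loop body, carrying the (table, rank) pair.
-- `not table.get(g)` is Python truthiness: true when g is missing OR mapped to an empty
-- dict, so both cases take the first branch; `rank[genres[i]] += plays[i]` only runs when
-- g is already a key of rank, so it is ported as getD g 0 + p.
def pvBodyA (genres : List String) (plays : List Int)
    (st : PySem.Dict String (PySem.Dict Int (List Int)) × PySem.Dict String Int) (i : Int) :
    PySem.Dict String (PySem.Dict Int (List Int)) × PySem.Dict String Int :=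
  let g := PySem.List.pyGetD genres i ""
  match st.1.get? g with
  | none =>
      (st.1.insert g (PySem.Dict.empty.insert (PySem.List.pyGetD plays i 0) [i]),
       st.2.insert g (PySem.List.pyGetD plays i 0))
  | some inner =>
      if inner.items.isEmpty then
        (st.1.insert g (PySem.Dict.empty.insert (PySem.List.pyGetD plays i 0) [i]),
         st.2.insert g (PySem.List.pyGetD plays i 0))
      else
        let p := PySem.List.pyGetD plays i 0
        let rank' := st.2.insert g (st.2.getD g 0 + p)
        match inner.get? p with
        | some lst =>
            if lst.isEmpty then (st.1.insert g (inner.insert p [i]), rank')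
            else (st.1.insert g (inner.insert p (lst ++ [i])), rank')
        | none => (st.1.insert g (inner.insert p [i]), rank')

-- literal port of A: one loop over range(len(genres)) threading (table, rank).
def hash_func (genres : List String) (plays : List Int) : (List (String × List (Int × List Int))) × (List (String × Int)) :=
  let st := (PySem.List.pyRange 0 (PySem.List.len genres) 1).foldl
    (pvBodyA genres plays) (PySem.Dict.empty, PySem.Dict.empty)
  (st.1.items.map (fun q => (q.1, q.2.items)), st.2.items)

-- ===== PORT B =====
-- B's grouping step: table.setdefault(g, {}).setdefault(plays[i], []).append(i),
-- i.e. a Dict.modify at both nesting levels.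
def pvBodyB (genres : List String) (plays : List Int)
    (t : PySem.Dict String (PySem.Dict Int (List Int))) (i : Int) :
    PySem.Dict String (PySem.Dict Int (List Int)) :=
  t.modify (PySem.List.pyGetD genres i "") PySem.Dict.empty
    (fun inner => inner.modify (PySem.List.pyGetD plays i 0) [] (fun l => l ++ [i]))

-- literal port of Source B: pass 1 groups the indices over enumerate(genres);
-- pass 2 derives rank from the finished table as sum(p * len(ix)).
def hash_func_alt (genres : List String) (plays : List Int) : (List (String × List (Int × List Int))) × (List (String × Int)) :=
  let table := (PySem.List.enumerate genres).foldl
    (fun t ig => pvBodyB genres plays t ig.1) PySem.Dict.empty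
  (table.items.map (fun q => (q.1, q.2.items)),
   table.items.map (fun q => (q.1, (q.2.items.map (fun pr => pr.1 * (pr.2.length : Int))).sum)))

-- ===== PRECONDITION & SPEC =====
-- Pre_ excludes exactly the inputs where the Python raises IndexError: both A and B read
-- plays[i] for every i < len(genres).
def Pre_hash_func (genres : List String) (plays : List Int) : Prop := genres.length ≤ plays.length
instance (genres : List String) (plays : List Int) : Decidable (Pre_hash_func genres plays) := by unfold Pre_hash_func; infer_instance
def pvWitness_hash_func : List String × List Int := (["pop", "rock", "pop"], [500, 600, 150])

def Spec_hash_func (genres : List String) (plays : List Int) (out : (List (String × List (Int × List Int))) × (List (String × Int))) : Prop := out = hash_func_alt genres plays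
instance (genres : List String) (plays : List Int) (out : (List (String × List (Int × List Int))) × (List (String × Int))) : Decidable (Spec_hash_func genres plays out) := by unfold Spec_hash_func; infer_instance

-- ===== CLAIM (what is proved, stated in full; the proofs are below) =====
def Claim_equal_hash_func : Prop := ∀ (genres : List String) (plays : List Int), Dom_hash_func genres plays → Pre_hash_func genres plays → Spec_hash_func genres plays (hash_func genres plays)

-- ===== LEMMAS AND PROOFS =====

-- the per-play summand of B's second pass
def pvEntry (pr : Int × List Int) : Int := pr.1 * (pr.2.length : Int)

def pvSum (inner : PySem.Dict Int (List Int)) : Int := (inner.items.map pvEntry).sum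

-- the rank dict A maintains, expressed as a function of the table
def pvRank (t : PySem.Dict String (PySem.Dict Int (List Int))) : PySem.Dict String Int :=
  PySem.Dict.mk (t.items.map (fun q => (q.1, pvSum q.2)))

-- loop invariant of the table: unique genre keys, and every inner dict nonempty with unique keys
def pvInv (t : PySem.Dict String (PySem.Dict Int (List Int))) : Prop :=
  t.keys.Nodup ∧ ∀ q ∈ t.items, q.2.items ≠ [] ∧ q.2.keys.Nodup

theorem pvSum_replace (p : Int) (lst : List Int) (i : Int) :
    ∀ (l : List (Int × List Int)), (l.map (·.1)).Nodup → (p, lst) ∈ l →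
    ((l.map (fun q => if (q.1 == p) = true then (p, lst ++ [i]) else q)).map pvEntry).sum
      = (l.map pvEntry).sum + p := by
  intro l
  induction l with
  | nil => intro _ hm; cases hm
  | cons a l ih =>
      intro hnd hm
      rw [List.map_cons] at hnd
      obtain ⟨hna, hndl⟩ := List.nodup_cons.mp hnd
      by_cases hap : a.1 = p
      · have ha : a = (p, lst) := by
          rcases List.mem_cons.mp hm with h | h
          · exact h.symm
          · exact absurd (hap ▸ List.mem_map_of_mem h : a.1 ∈ l.map (·.1)) hna
        have htail : l.map (fun q => if (q.1 == p) = true then (p, lst ++ [i]) else q) = l := by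
          conv_rhs => rw [← List.map_id l]
          apply List.map_congr_left
          intro q hq
          have hqp : q.1 ≠ p := by
            intro hqp
            exact hna (hap ▸ hqp ▸ List.mem_map_of_mem hq)
          simp [hqp]
        subst ha
        simp only [List.map_cons, htail, List.sum_cons, beq_self_eq_true, if_true, pvEntry,
          List.length_append, List.length_cons, List.length_nil]
        push_cast
        ring
      · have hm' : (p, lst) ∈ l := by
          rcases List.mem_cons.mp hm with h | h
          · exact absurd (congrArg Prod.fst h).symm hap
          · exact h
        rw [List.map_cons, List.map_cons, List.sum_cons, List.map_cons, List.sum_cons,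
          if_neg (by simp [hap]), ih hndl hm']
        ring

theorem pvInsert_items_ne_nil {κ ν : Type} [BEq κ] (d : PySem.Dict κ ν) (k : κ) (v : ν) :
    (d.insert k v).items ≠ [] := by
  rcases hc : d.contains k with _ | _
  · simp [PySem.Dict.items_insert_of_not_contains d v hc]
  · have : d.items ≠ [] := by
      intro h
      rw [PySem.Dict.contains_eq_isSome_get?] at hc
      cases d with
      | mk items => cases h; simp [PySem.Dict.get?] at hc
    simp [PySem.Dict.items_insert_of_contains d v hc, this]

theorem pvSum_modify (inner : PySem.Dict Int (List Int)) (hnd : inner.keys.Nodup) (p i : Int) :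
    pvSum (inner.insert p (inner.getD p [] ++ [i])) = pvSum inner + p := by
  rcases hc : inner.get? p with _ | lst
  · have hcont : inner.contains p = false := by
      rw [PySem.Dict.contains_eq_isSome_get?, hc]; rfl
    rw [PySem.Dict.getD_of_not_contains inner [] hcont]
    unfold pvSum
    rw [PySem.Dict.items_insert_of_not_contains inner _ hcont]
    simp [pvEntry]
  · have hcont : inner.contains p = true := by
      rw [PySem.Dict.contains_eq_isSome_get?, hc]; rfl
    rw [PySem.Dict.getD_of_get?_eq_some inner [] hc]
    unfold pvSum
    rw [PySem.Dict.items_insert_of_contains inner _ hcont]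
    exact pvSum_replace p lst i inner.items hnd (PySem.Dict.mem_items_of_get?_eq_some inner hc)

theorem pvRank_keys (t : PySem.Dict String (PySem.Dict Int (List Int))) :
    (pvRank t).keys = t.keys := by
  unfold pvRank
  rw [PySem.Dict.keys_mk, List.map_map]
  rfl

theorem pvRank_getD (t : PySem.Dict String (PySem.Dict Int (List Int))) (hnd : t.keys.Nodup)
    (g : String) (inner : PySem.Dict Int (List Int)) (h : t.get? g = some inner) :
    (pvRank t).getD g 0 = pvSum inner := by
  have hm : (g, inner) ∈ t.items := PySem.Dict.mem_items_of_get?_eq_some t h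
  have hm2 : (g, pvSum inner) ∈ (pvRank t).items :=
    List.mem_map_of_mem (f := fun q => (q.1, pvSum q.2)) hm
  exact PySem.Dict.getD_of_mem_items (pvRank t) hm2 ((pvRank_keys t).symm ▸ hnd) 0

theorem pvStep (genres : List String) (plays : List Int)
    (t : PySem.Dict String (PySem.Dict Int (List Int))) (h : pvInv t) (i : Int) :
    pvBodyA genres plays (t, pvRank t) i = (pvBodyB genres plays t i, pvRank (pvBodyB genres plays t i))
      ∧ pvInv (pvBodyB genres plays t i) := by
  obtain ⟨hnd, hinner⟩ := h
  unfold pvBodyA pvBodyB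
  rcases hc : t.get? (PySem.List.pyGetD genres i "") with _ | inner
  all_goals
    simp only [hc]
  -- fresh genre: both sides append a one-entry inner dict; rank appends plays[i]
  · have hcont : t.contains (PySem.List.pyGetD genres i "") = false := by
      rw [PySem.Dict.contains_eq_isSome_get?, hc]; rfl
    have hmod : (t.modify (PySem.List.pyGetD genres i "") PySem.Dict.empty fun inner =>
          inner.modify (PySem.List.pyGetD plays i 0) [] fun l => l ++ [i])
        = t.insert (PySem.List.pyGetD genres i "")
            (PySem.Dict.empty.insert (PySem.List.pyGetD plays i 0) [i]) := by
      simp only [PySem.Dict.modify, PySem.Dict.getD_of_not_contains t PySem.Dict.empty hcont,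
        PySem.Dict.getD_empty, List.nil_append]
    rw [hmod]
    have hgk : PySem.List.pyGetD genres i "" ∉ t.keys :=
      (PySem.Dict.get?_eq_none_iff_not_mem_keys t _).mp hc
    have hcontR : (pvRank t).contains (PySem.List.pyGetD genres i "") = false := by
      rw [PySem.Dict.contains_eq_isSome_get?,
        (PySem.Dict.get?_eq_none_iff_not_mem_keys (pvRank t) _).mpr
          ((pvRank_keys t) ▸ hgk)]; rfl
    have hJ : (PySem.Dict.empty.insert (PySem.List.pyGetD plays i 0) [i]).items
        = [(PySem.List.pyGetD plays i 0, [i])] := by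
      rw [PySem.Dict.items_insert_of_not_contains PySem.Dict.empty [i]
        (PySem.Dict.contains_empty _)]
      rfl
    refine ⟨Prod.ext rfl ?_, ?_, ?_⟩
    · apply PySem.Dict.ext
      rw [PySem.Dict.items_insert_of_not_contains (pvRank t) _ hcontR]
      show _ = (t.insert (PySem.List.pyGetD genres i "") _).items.map _
      rw [PySem.Dict.items_insert_of_not_contains t _ hcont, List.map_append]
      simp [pvRank, pvSum, pvEntry, hJ]
    · exact PySem.Dict.nodup_keys_insert t _ _ hnd
    · intro q hq
      rw [PySem.Dict.items_insert_of_not_contains t _ hcont] at hq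
      rcases List.mem_append.mp hq with h | h
      · exact hinner q h
      · rcases List.mem_singleton.mp h with rfl
        refine ⟨by simp [hJ], ?_⟩
        exact PySem.Dict.nodup_keys_insert _ _ _ PySem.Dict.nodup_keys_empty
  -- existing genre: both sides replace the inner dict in place; rank adds plays[i]
  · have hm : (PySem.List.pyGetD genres i "", inner) ∈ t.items :=
      PySem.Dict.mem_items_of_get?_eq_some t hc
    have hne : inner.items ≠ [] := (hinner _ hm).1
    have hndI : inner.keys.Nodup := (hinner _ hm).2
    have hie : inner.items.isEmpty = false := by simp [hne]
    have hcont : t.contains (PySem.List.pyGetD genres i "") = true := by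
      rw [PySem.Dict.contains_eq_isSome_get?, hc]; rfl
    have hgk : PySem.List.pyGetD genres i "" ∈ t.keys := by
      by_contra hg
      rw [← PySem.Dict.get?_eq_none_iff_not_mem_keys t _] at hg
      rw [hg] at hc; cases hc
    have hcontR : (pvRank t).contains (PySem.List.pyGetD genres i "") = true := by
      rw [PySem.Dict.contains_eq_decide_mem_keys, pvRank_keys]
      simpa using hgk
    -- the modified inner dict
    have hmod : (t.modify (PySem.List.pyGetD genres i "") PySem.Dict.empty fun inner =>
          inner.modify (PySem.List.pyGetD plays i 0) [] fun l => l ++ [i])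
        = t.insert (PySem.List.pyGetD genres i "")
            (inner.insert (PySem.List.pyGetD plays i 0)
              (inner.getD (PySem.List.pyGetD plays i 0) [] ++ [i])) := by
      unfold PySem.Dict.modify
      rw [PySem.Dict.getD_of_get?_eq_some t PySem.Dict.empty hc]
    rw [hmod]
    have hSum : pvSum (inner.insert (PySem.List.pyGetD plays i 0)
          (inner.getD (PySem.List.pyGetD plays i 0) [] ++ [i]))
        = pvSum inner + PySem.List.pyGetD plays i 0 :=
      pvSum_modify inner hndI _ i
    have hrank : (pvRank t).insert (PySem.List.pyGetD genres i "")
          ((pvRank t).getD (PySem.List.pyGetD genres i "") 0 + PySem.List.pyGetD plays i 0)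
        = pvRank (t.insert (PySem.List.pyGetD genres i "")
            (inner.insert (PySem.List.pyGetD plays i 0)
              (inner.getD (PySem.List.pyGetD plays i 0) [] ++ [i]))) := by
      apply PySem.Dict.ext
      rw [PySem.Dict.items_insert_of_contains (pvRank t) _ hcontR,
        pvRank_getD t hnd _ inner hc]
      show _ = (t.insert _ _).items.map _
      rw [PySem.Dict.items_insert_of_contains t _ hcont]
      unfold pvRank
      rw [List.map_map, List.map_map]
      apply List.map_congr_left
      intro q hq
      by_cases hq1 : q.1 = PySem.List.pyGetD genres i ""
      · simp [Function.comp, hq1, hSum]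
      · simp [Function.comp, hq1]
    constructor
    · -- the three A-branches all produce (t.insert g innB, rank')
      rcases hp : inner.get? (PySem.List.pyGetD plays i 0) with _ | lst
      · have hpd : inner.getD (PySem.List.pyGetD plays i 0) [] = [] :=
          PySem.Dict.getD_of_not_contains inner []
            (by rw [PySem.Dict.contains_eq_isSome_get?, hp]; rfl)
        rw [hpd, List.nil_append] at hrank
        simp only [hie, Bool.false_eq_true, if_false, hpd, List.nil_append]
        exact Prod.ext rfl hrank
      · have hpd : inner.getD (PySem.List.pyGetD plays i 0) [] = lst :=
          PySem.Dict.getD_of_get?_eq_some inner [] hp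
        rw [hpd] at hrank
        simp only [hie, Bool.false_eq_true, if_false, hpd]
        by_cases hlst : lst = []
        · subst hlst
          rw [List.nil_append] at hrank
          simp only [List.isEmpty_nil, if_true, List.nil_append]
          exact Prod.ext rfl hrank
        · rw [if_neg (by simp [hlst])]
          exact Prod.ext rfl hrank
    · -- the invariant survives
      refine ⟨PySem.Dict.nodup_keys_insert t _ _ hnd, ?_⟩
      intro q hq
      rw [PySem.Dict.items_insert_of_contains t _ hcont] at hq
      obtain ⟨q', hq', rfl⟩ := List.mem_map.mp hq
      by_cases hq1 : q'.1 = PySem.List.pyGetD genres i ""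
      · rw [if_pos (by simp [hq1])]
        exact ⟨pvInsert_items_ne_nil _ _ _, PySem.Dict.nodup_keys_insert _ _ _ hndI⟩
      · rw [if_neg (by simp [hq1])]
        exact hinner q' hq'

theorem pvFold (genres : List String) (plays : List Int) :
    ∀ (L : List Int) (t : PySem.Dict String (PySem.Dict Int (List Int))), pvInv t →
    L.foldl (pvBodyA genres plays) (t, pvRank t)
      = (L.foldl (pvBodyB genres plays) t, pvRank (L.foldl (pvBodyB genres plays) t))
      ∧ pvInv (L.foldl (pvBodyB genres plays) t) := by
  intro L
  induction L with
  | nil => intro t h; exact ⟨rfl, h⟩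
  | cons x L ih =>
      intro t h
      obtain ⟨hstep, hinv⟩ := pvStep genres plays t h x
      simpa [List.foldl_cons, hstep] using ih (pvBodyB genres plays t x) hinv

-- ===== VERDICT (by name: the statement is the Claim_ definition above) =====
theorem hash_func_spec : Claim_equal_hash_func := by
  intro genres plays _hdom _hpre
  unfold Spec_hash_func hash_func hash_func_alt
  rw [PySem.List.enumerate_eq_map_pyRange genres "", List.foldl_map]
  obtain ⟨hfold, -⟩ := pvFold genres plays (PySem.List.pyRange 0 (PySem.List.len genres) 1)
    PySem.Dict.empty ⟨by simp, by intro a hb; simp [PySem.Dict.empty] at hb⟩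
  rw [show ((PySem.Dict.empty, PySem.Dict.empty) :
        PySem.Dict String (PySem.Dict Int (List Int)) × PySem.Dict String Int)
      = (PySem.Dict.empty, pvRank PySem.Dict.empty) from rfl, hfold]
  rfl
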